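-- pv_equiv track=rewrite | github.com/Programming641/same_shapes_between_frames_of_video | libraries/pixel_shapes_functions.py | get_boundary_pixels
-- ===== SOURCE A (Python) =====
-- def get_boundary_pixels(pixels, im_size=None):
--     pixels = set(pixels)  # ensure it's a set for fast lookup
--     boundary = set()
--
--     for (x, y) in pixels:
--         # Check 4-connected neighbors
--         neighbors = [(x+1, y), (x-1, y), (x, y+1), (x, y-1)]
--         for nx, ny in neighbors:
--             if (nx, ny) not in pixels:
--                 boundary.add((x, y))
--                 break  # no need to check more neighbors, already boundary
--     return boundary
-- ===== SOURCE B (Python) =====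
-- def get_boundary_pixels(pixels, im_size=None):
--     pixels = set(pixels)
--     def shift(dx, dy):
--         return {(x - dx, y - dy) for (x, y) in pixels}
--     interior = pixels & shift(1, 0) & shift(-1, 0) & shift(0, 1) & shift(0, -1)
--     return pixels - interior
-- ===== Notes on version B (the rewrite author's own statement) =====
-- stated objective: alternative
-- what changed: Replaces the per-pixel neighbor-probing loop (with inner break) by whole-set algebra: the interior is the intersection of the pixel set with its four one-pixel shifts, and the boundary is the set difference pixels - interior.
import Mathlib
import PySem

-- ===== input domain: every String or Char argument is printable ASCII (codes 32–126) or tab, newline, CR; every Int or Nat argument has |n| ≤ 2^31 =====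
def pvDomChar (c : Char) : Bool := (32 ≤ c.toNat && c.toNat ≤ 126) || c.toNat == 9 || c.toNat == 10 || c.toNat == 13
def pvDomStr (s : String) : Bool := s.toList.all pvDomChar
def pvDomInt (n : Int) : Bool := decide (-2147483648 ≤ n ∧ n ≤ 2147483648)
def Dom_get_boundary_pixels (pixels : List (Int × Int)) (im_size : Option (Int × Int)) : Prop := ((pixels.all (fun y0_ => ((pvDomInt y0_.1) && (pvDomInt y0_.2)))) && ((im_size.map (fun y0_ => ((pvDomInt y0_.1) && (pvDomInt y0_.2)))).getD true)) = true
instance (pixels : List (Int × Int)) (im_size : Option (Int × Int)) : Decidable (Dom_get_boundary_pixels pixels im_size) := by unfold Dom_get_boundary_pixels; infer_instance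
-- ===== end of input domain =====

-- B replaces A's per-pixel neighbor-probing loop by whole-set algebra (interior =
-- intersection of the pixel set with its four shifts; boundary = pixels - interior):
-- an alternative of the same cost. im_size is unused by both, as in the Python.

-- ===== PORT A =====
def get_boundary_pixels (pixels : List (Int × Int)) (im_size : Option (Int × Int)) : List (Int × Int) :=
  let ps : PySem.Set (Int × Int) := PySem.Set.ofList pixels
  -- inner 'for … break' just decides whether (x, y) is added: ported as List.any
  ps.foldl (fun boundary p =>
    let neighbors : List (Int × Int) := [(p.1 + 1, p.2), (p.1 - 1, p.2), (p.1, p.2 + 1), (p.1, p.2 - 1)]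
    if neighbors.any (fun n => !(PySem.Set.contains ps n)) then PySem.Set.add boundary p else boundary)
    PySem.Set.empty

-- ===== PORT B =====
-- {(x - dx, y - dy) for (x, y) in pixels}
def pvShift (ps : PySem.Set (Int × Int)) (dx dy : Int) : PySem.Set (Int × Int) :=
  PySem.Set.ofList (ps.map (fun p => (p.1 - dx, p.2 - dy)))

def get_boundary_pixels_alt (pixels : List (Int × Int)) (im_size : Option (Int × Int)) : List (Int × Int) :=
  let ps : PySem.Set (Int × Int) := PySem.Set.ofList pixels
  let interior := PySem.Set.inter (PySem.Set.inter (PySem.Set.inter (PySem.Set.inter ps (pvShift ps 1 0)) (pvShift ps (-1) 0)) (pvShift ps 0 1)) (pvShift ps 0 (-1))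
  PySem.Set.diff ps interior

-- ===== PRECONDITION & SPEC =====
def Spec_get_boundary_pixels (pixels : List (Int × Int)) (im_size : Option (Int × Int)) (out : List (Int × Int)) : Prop := out = get_boundary_pixels_alt pixels im_size
instance (pixels : List (Int × Int)) (im_size : Option (Int × Int)) (out : List (Int × Int)) : Decidable (Spec_get_boundary_pixels pixels im_size out) := by unfold Spec_get_boundary_pixels; infer_instance

-- ===== CLAIM (what is proved, stated in full; the proofs are below) =====
def Claim_equal_get_boundary_pixels : Prop := ∀ (pixels : List (Int × Int)) (im_size : Option (Int × Int)), Dom_get_boundary_pixels pixels im_size → Spec_get_boundary_pixels pixels im_size (get_boundary_pixels pixels im_size)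

-- ===== LEMMAS AND PROOFS =====

-- A's conditional-add fold over a duplicate-free list is a filter.
theorem foldl_add_filter {α : Type} [BEq α] [LawfulBEq α] (c : α → Bool) :
    ∀ (ps acc : List α), ps.Nodup → (∀ p ∈ ps, p ∉ acc) →
      ps.foldl (fun b p => if c p then PySem.Set.add b p else b) acc = acc ++ ps.filter c := by
  intro ps
  induction ps with
  | nil => intro acc _ _; simp
  | cons p ps ih =>
    intro acc hnd hfresh
    simp only [List.foldl_cons, List.filter_cons]
    rcases List.nodup_cons.mp hnd with ⟨hp, hnd'⟩
    by_cases hc : c p = true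
    · rw [if_pos hc, if_pos hc,
        PySem.Set.add_of_not_mem (hfresh p (List.mem_cons_self)),
        ih (acc ++ [p]) hnd']
      · simp
      · intro q hq
        simp only [List.mem_append, List.mem_singleton]
        rintro (h | rfl)
        · exact hfresh q (List.mem_cons_of_mem _ hq) h
        · exact hp hq
    · rw [if_neg hc, if_neg hc, ih acc hnd' (fun q hq => hfresh q (List.mem_cons_of_mem _ hq))]

-- membership in a shifted set
theorem mem_pvShift (ps : PySem.Set (Int × Int)) (dx dy : Int) (p : Int × Int) :
    p ∈ pvShift ps dx dy ↔ (p.1 + dx, p.2 + dy) ∈ ps := by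
  unfold pvShift
  rw [PySem.Set.mem_ofList, List.mem_map]
  constructor
  · rintro ⟨q, hq, rfl⟩
    simpa using hq
  · intro h
    exact ⟨(p.1 + dx, p.2 + dy), h, by simp⟩

theorem get_boundary_pixels_eq (pixels : List (Int × Int)) (im_size : Option (Int × Int)) :
    get_boundary_pixels pixels im_size = get_boundary_pixels_alt pixels im_size := by
  unfold get_boundary_pixels get_boundary_pixels_alt
  dsimp only
  set ps : PySem.Set (Int × Int) := PySem.Set.ofList pixels with hps
  rw [show (PySem.Set.empty : PySem.Set (Int × Int)) = [] from rfl]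
  rw [foldl_add_filter (fun p => ([(p.1 + 1, p.2), (p.1 - 1, p.2), (p.1, p.2 + 1), (p.1, p.2 - 1)] : List (Int × Int)).any fun n => !ps.contains n) ps [] (PySem.Set.nodup_ofList pixels) (by simp),
    List.nil_append]
  show _ = PySem.Set.diff ps _
  rw [show ∀ (s t : PySem.Set (Int × Int)), PySem.Set.diff s t =
      s.filter (fun x => !(PySem.Set.contains t x)) from fun _ _ => rfl]
  apply List.filter_congr
  intro p hp
  simp only [List.any_cons, List.any_nil, Bool.or_false,
    PySem.Set.contains_eq_listContains]
  have hmem : ∀ (s : List (Int × Int)) (q : Int × Int), List.contains s q = decide (q ∈ s) := by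
    intro s q
    by_cases h : q ∈ s
    · simp [h]
    · simp [h]
  rw [hmem, hmem, hmem, hmem, hmem]
  have : (p ∈ PySem.Set.inter (PySem.Set.inter (PySem.Set.inter (PySem.Set.inter ps (pvShift ps 1 0)) (pvShift ps (-1) 0)) (pvShift ps 0 1)) (pvShift ps 0 (-1)))
      ↔ ((p.1 + 1, p.2) ∈ ps ∧ (p.1 - 1, p.2) ∈ ps ∧ (p.1, p.2 + 1) ∈ ps ∧ (p.1, p.2 - 1) ∈ ps) := by
    rw [PySem.Set.mem_inter, PySem.Set.mem_inter, PySem.Set.mem_inter, PySem.Set.mem_inter,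
      mem_pvShift, mem_pvShift, mem_pvShift, mem_pvShift]
    constructor
    · rintro ⟨⟨⟨⟨_, h1⟩, h2⟩, h3⟩, h4⟩
      exact ⟨by simpa using h1, by simpa using h2, by simpa using h3, by simpa using h4⟩
    · rintro ⟨h1, h2, h3, h4⟩
      exact ⟨⟨⟨⟨hp, by simpa using h1⟩, by simpa using h2⟩, by simpa using h3⟩, by simpa using h4⟩
  simp only [this]
  by_cases h1 : (p.1 + 1, p.2) ∈ ps <;> by_cases h2 : (p.1 - 1, p.2) ∈ ps <;>
    by_cases h3 : (p.1, p.2 + 1) ∈ ps <;> by_cases h4 : (p.1, p.2 - 1) ∈ ps <;>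
    simp [h1, h2, h3, h4]

-- ===== VERDICT (by name: the statement is the Claim_ definition above) =====
theorem get_boundary_pixels_spec : Claim_equal_get_boundary_pixels := by
  intro pixels im_size _
  unfold Spec_get_boundary_pixels
  exact get_boundary_pixels_eq pixels im_size
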